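-- pv_equiv track=rewrite | github.com/MrBrantCode/unitest_baseline | mut_generate/mist_train_cf/cf_102887/solution.py | find_longest_word_with_vowel
-- ===== SOURCE A (Python) =====
-- def find_longest_word_with_vowel(string):
--     vowels = ['a', 'e', 'i', 'o', 'u']
--     words = string.split()
--     longest_word = ''
--     for word in words:
--         if word[0].lower() in vowels and len(word) > len(longest_word):
--             longest_word = word
--     return longest_word
-- ===== SOURCE B (Python) =====
-- def find_longest_word_with_vowel(string):
--     vowels = ['a', 'e', 'i', 'o', 'u']
--     candidates = [w for w in string.split() if w[0].lower() in vowels]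
--     ranked = sorted(candidates, key=len, reverse=True)
--     return ranked[0] if ranked else ''
-- ===== Notes on version B (the rewrite author's own statement) =====
-- stated objective: alternative
-- what changed: Replaced A's single accumulating best-so-far scan by a filter-then-stable-descending-sort-then-pick-first decomposition (ties resolved by sort stability).
import Mathlib
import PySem

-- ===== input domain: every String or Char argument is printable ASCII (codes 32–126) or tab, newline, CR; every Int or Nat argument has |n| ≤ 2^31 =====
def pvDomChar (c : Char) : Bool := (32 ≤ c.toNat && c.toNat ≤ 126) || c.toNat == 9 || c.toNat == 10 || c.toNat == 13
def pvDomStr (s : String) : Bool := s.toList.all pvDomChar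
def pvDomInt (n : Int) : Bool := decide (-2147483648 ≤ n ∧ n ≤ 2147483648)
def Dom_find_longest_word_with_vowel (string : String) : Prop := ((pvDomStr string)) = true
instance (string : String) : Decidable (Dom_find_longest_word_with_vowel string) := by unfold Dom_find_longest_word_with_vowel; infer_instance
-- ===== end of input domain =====

-- B replaces A's best-so-far scan by filter → stable descending sort by length → first element; same value, no speed claim.

-- ===== PORT A =====
-- shared predicate of both Pythons: word[0].lower() in vowels.
-- word[0] via pyGet?; the 'none' (IndexError) branch is unreachable: str.split() never yields an empty word.
def pvVowelStart (word : String) : Bool :=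
  match PySem.Str.pyGet? word 0 with
  | some c => PySem.Chars.lowerChar c ∈ (['a', 'e', 'i', 'o', 'u'] : List Char)
  | none => false

def find_longest_word_with_vowel (string : String) : String :=
  (PySem.Str.split₀ string).foldl
    (fun longest_word word =>
      if pvVowelStart word && decide (PySem.Str.len longest_word < PySem.Str.len word)
      then word else longest_word) ""

-- ===== PORT B =====
def find_longest_word_with_vowel_alt (string : String) : String :=
  let candidates := (PySem.Str.split₀ string).filter pvVowelStart
  let ranked := PySem.List.sorted candidates PySem.Str.len true
  match ranked with
  | [] => ""
  | h :: _ => h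

-- ===== PRECONDITION & SPEC =====
def Spec_find_longest_word_with_vowel (string : String) (out : String) : Prop := out = find_longest_word_with_vowel_alt string
instance (string : String) (out : String) : Decidable (Spec_find_longest_word_with_vowel string out) := by unfold Spec_find_longest_word_with_vowel; infer_instance

-- ===== CLAIM (what is proved, stated in full; the proofs are below) =====
def Claim_equal_find_longest_word_with_vowel : Prop := ∀ (string : String), Dom_find_longest_word_with_vowel string → Spec_find_longest_word_with_vowel string (find_longest_word_with_vowel string)

-- ===== LEMMAS AND PROOFS =====

-- A's loop step, restricted to the words that passed the vowel test
def pvStep (acc w : String) : String :=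
  if PySem.Str.len acc < PySem.Str.len w then w else acc

-- head of an insertion into the sort's accumulator, as a one-step combine on heads
def pvHeadStep (h : Option String) (x : String) : Option String :=
  match h with
  | none => some x
  | some m => if PySem.Str.len m < PySem.Str.len x then some x else some m

theorem pvHead_insertBy (x : String) (l : List String) :
    (PySem.List.insertBy (fun a b => decide (PySem.Str.len b < PySem.Str.len a)) x l).head? =
      pvHeadStep l.head? x := by
  cases l with
  | nil => rfl
  | cons y ys =>
    simp only [PySem.List.insertBy, pvHeadStep, List.head?]
    split_ifs with h h' <;> simp_all <;> omega

theorem pvHead_foldl_insertBy (l acc : List String) :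
    (l.foldl (fun acc x => PySem.List.insertBy (fun a b => decide (PySem.Str.len b < PySem.Str.len a)) x acc) acc).head? =
      l.foldl pvHeadStep acc.head? := by
  induction l generalizing acc with
  | nil => rfl
  | cons x t ih =>
    simp only [List.foldl_cons, ih, pvHead_insertBy]

theorem pvFoldl_headStep_some (l : List String) (a : String) :
    l.foldl pvHeadStep (some a) = some (l.foldl pvStep a) := by
  induction l generalizing a with
  | nil => rfl
  | cons x t ih =>
    simp only [List.foldl_cons, pvHeadStep, pvStep]
    split_ifs <;> exact ih _

theorem pvLen_zero_eq_empty (s : String) (h : PySem.Str.len s = 0) : s = "" := by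
  rw [PySem.Str.len_eq] at h
  have h2 : s.toList = [] := List.eq_nil_of_length_eq_zero (by exact_mod_cast h)
  have h3 := congrArg String.ofList h2
  simpa using h3

theorem pvStep_empty (x : String) : pvStep "" x = x := by
  by_cases hx : PySem.Str.len "" < PySem.Str.len x
  · simp [pvStep]
  · have h0 : PySem.Str.len x = 0 := by
      have hge : (0 : Int) ≤ PySem.Str.len x := by
        rw [PySem.Str.len_eq]; exact_mod_cast Nat.zero_le _
      have he : PySem.Str.len "" = 0 := by decide
      omega
    rw [pvLen_zero_eq_empty x h0]
    decide

-- A's fold over the filtered words equals the first element of the stable descending sort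
theorem pvFold_eq_sorted_head (l : List String) :
    l.foldl pvStep "" =
      (match PySem.List.sorted l PySem.Str.len true with
       | [] => ""
       | h :: _ => h) := by
  rw [PySem.List.sorted_rev_eq_foldl_insertBy]
  cases l with
  | nil => rfl
  | cons x t =>
    have hh := pvHead_foldl_insertBy (x :: t) []
    have hsome : ((x :: t).foldl (fun acc x => PySem.List.insertBy (fun a b => decide (PySem.Str.len b < PySem.Str.len a)) x acc) []).head?
        = some ((x :: t).foldl pvStep "") := by
      rw [hh]
      simp only [List.head?, List.foldl_cons, pvHeadStep, pvFoldl_headStep_some, pvStep_empty]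
    cases hres : (x :: t).foldl (fun acc x => PySem.List.insertBy (fun a b => decide (PySem.Str.len b < PySem.Str.len a)) x acc) [] with
    | nil => rw [hres] at hsome; simp at hsome
    | cons h hs => rw [hres] at hsome; simp at hsome; simp [hsome]

-- ===== VERDICT (by name: the statement is the Claim_ definition above) =====
theorem find_longest_word_with_vowel_spec : Claim_equal_find_longest_word_with_vowel := by
  intro string _
  unfold Spec_find_longest_word_with_vowel find_longest_word_with_vowel find_longest_word_with_vowel_alt
  have hcong : (PySem.Str.split₀ string).foldl
      (fun longest_word word =>
        if pvVowelStart word && decide (PySem.Str.len longest_word < PySem.Str.len word)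
        then word else longest_word) ""
      = (PySem.Str.split₀ string).foldl
        (fun acc w => if pvVowelStart w then pvStep acc w else acc) "" := by
    apply PySem.List.foldl_congr_mem
    intro acc w _
    cases hv : pvVowelStart w <;> simp [pvStep]
  rw [hcong, PySem.List.foldl_if_eq_foldl_filter, pvFold_eq_sorted_head]
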